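-- pv_equiv track=rewrite | github.com/prashantsingh003/Data-Structures | 02_arrays/largest_contigous_subarray.py | sol_n2
-- ===== SOURCE A (Python) =====
-- def sol_n2(nums):
-- 	max_sum=0
-- 	for i in range(len(nums)):
-- 		s=0
-- 		for j in range(i,len(nums)):
-- 			s+=nums[j]
-- 		max_sum=max(max_sum,s)
-- 	return max_sum
-- ===== SOURCE B (Python) =====
-- def sol_n2(nums):
--     best = 0
--     s = 0
--     for x in reversed(nums):
--         s += x
--         if s > best:
--             best = s
--     return best
-- ===== Notes on version B (the rewrite author's own statement) =====
-- stated objective: faster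
-- what changed: Replaced the quadratic loop that re-sums every suffix from scratch with a single right-to-left pass accumulating the running suffix sum and its maximum (floored at 0).
import Mathlib
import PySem

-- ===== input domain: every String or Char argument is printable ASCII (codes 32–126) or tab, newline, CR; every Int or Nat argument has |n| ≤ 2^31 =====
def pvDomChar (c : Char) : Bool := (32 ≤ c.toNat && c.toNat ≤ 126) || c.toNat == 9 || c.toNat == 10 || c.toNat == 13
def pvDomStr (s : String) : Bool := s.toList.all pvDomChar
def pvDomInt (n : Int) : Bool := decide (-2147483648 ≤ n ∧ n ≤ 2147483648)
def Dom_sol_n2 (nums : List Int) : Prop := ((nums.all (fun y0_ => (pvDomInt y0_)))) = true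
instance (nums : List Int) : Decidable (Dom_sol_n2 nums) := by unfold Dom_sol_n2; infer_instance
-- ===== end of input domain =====

-- B replaces A's quadratic re-summation of every suffix with one right-to-left pass
-- keeping a running suffix sum and its maximum (floored at 0); objective: faster.

-- ===== PORT A =====
def sol_n2 (nums : List Int) : Int :=
  (PySem.List.pyRange 0 (nums.length : Int) 1).foldl
    (fun max_sum i =>
      let s := (PySem.List.pyRange i (nums.length : Int) 1).foldl
        (fun s j => s + PySem.List.pyGetD nums j 0) 0
      max max_sum s) 0

-- ===== PORT B =====
def sol_n2_alt (nums : List Int) : Int :=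
  (nums.reverse.foldl
    (fun (st : Int × Int) x =>
      let s := st.1 + x
      (s, if s > st.2 then s else st.2)) (0, 0)).2

-- ===== PRECONDITION & SPEC =====
def Spec_sol_n2 (nums : List Int) (out : Int) : Prop := out = sol_n2_alt nums
instance (nums : List Int) (out : Int) : Decidable (Spec_sol_n2 nums out) := by unfold Spec_sol_n2; infer_instance

-- ===== CLAIM (what is proved, stated in full; the proofs are below) =====
def Claim_equal_sol_n2 : Prop := ∀ (nums : List Int), Dom_sol_n2 nums → Spec_sol_n2 nums (sol_n2 nums)

-- ===== LEMMAS AND PROOFS =====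

/-- Maximum of 0 and all (non-empty) suffix sums. -/
def sufMax : List Int → Int
  | [] => 0
  | x :: t => max (sufMax t) (x + t.sum)

lemma sufMax_nonneg : ∀ l : List Int, 0 ≤ sufMax l
  | [] => le_refl 0
  | _ :: t => le_trans (sufMax_nonneg t) (le_max_left _ _)

/-- Invariant of B's single reversed pass. -/
lemma B_inv (l : List Int) :
    l.reverse.foldl
      (fun (st : Int × Int) x =>
        let s := st.1 + x
        (s, if s > st.2 then s else st.2)) (0, 0) = (l.sum, sufMax l) := by
  induction l with
  | nil => rfl
  | cons x t ih =>
      simp only [List.reverse_cons, List.foldl_append, ih, List.foldl_cons, List.foldl_nil]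
      simp only [sufMax, List.sum_cons, Prod.mk.injEq]
      constructor
      · ring
      · have h : t.sum + x = x + t.sum := by ring
        rw [h]
        split_ifs <;> omega

/-- A's outer loop, specified as recursion on the remaining suffix. -/
def loopSpec (m : Int) : List Int → Int
  | [] => m
  | x :: t => loopSpec (max m (x + t.sum)) t

lemma loopSpec_eq (l : List Int) : ∀ m, 0 ≤ m → loopSpec m l = max m (sufMax l) := by
  induction l with
  | nil => intro m hm; simp only [loopSpec, sufMax]; omega
  | cons x t ih =>
      intro m hm
      simp only [loopSpec, sufMax]
      rw [ih _ (by omega)]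
      omega

lemma A_outer (nums : List Int) :
    ∀ (k : Nat) (a m : Int), 0 ≤ a → a.toNat + k = nums.length →
    (PySem.List.pyRange a (nums.length : Int) 1).foldl
      (fun max_sum i =>
        let s := (PySem.List.pyRange i (nums.length : Int) 1).foldl
          (fun s j => s + PySem.List.pyGetD nums j 0) 0
        max max_sum s) m = loopSpec m (nums.drop a.toNat) := by
  intro k
  induction k with
  | zero =>
      intro a m ha hk
      rw [PySem.List.pyRange_one_eq_nil (by omega)]
      rw [List.drop_of_length_le (by omega)]
      rfl
  | succ k ih =>
      intro a m ha hk
      have halt : a < (nums.length : Int) := by omega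
      have hlt : a.toNat < nums.length := by omega
      rw [PySem.List.pyRange_one_cons halt]
      rw [List.foldl_cons]
      have hinner :
          (PySem.List.pyRange a (nums.length : Int) 1).foldl
            (fun s j => s + PySem.List.pyGetD nums j 0) 0
            = (nums.drop a.toNat).sum := by
        rw [PySem.List.foldl_pyRange_pyGetD' (xs := nums) (d := 0) (f := fun s x => s + x) (init := 0) ha]
        rw [PySem.List.foldl_add (g := fun x => x)]
        simp
      simp only [hinner]
      rw [ih (a + 1) _ (by omega) (by omega)]
      have hdrop : nums.drop a.toNat = nums[a.toNat] :: nums.drop (a.toNat + 1) :=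
        (List.getElem_cons_drop hlt).symm
      have hnat : (a + 1).toNat = a.toNat + 1 := by omega
      rw [hnat, hdrop, List.sum_cons]
      simp only [loopSpec]

-- ===== VERDICT (by name: the statement is the Claim_ definition above) =====
theorem sol_n2_spec : Claim_equal_sol_n2 := by
  intro nums _
  unfold Spec_sol_n2 sol_n2 sol_n2_alt
  rw [B_inv]
  rw [A_outer nums nums.length 0 0 le_rfl (by simp)]
  simp only [Int.toNat_zero, List.drop_zero]
  rw [loopSpec_eq _ _ le_rfl]
  have := sufMax_nonneg nums
  omega
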